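-- pv_equiv track=rewrite | github.com/cjf0019/Miscellaneous | AtomicPhysics/gettransnums.py | gettransnos
-- ===== SOURCE A (Python) =====
-- def gettransnos(trmno, total, iptrm):
--     ntr = 0
--     ntrmn = 0
--     for i in range(trmno-1):
--         total -= 1
--         iptrm -= 1
--         ntr += total
--
--     iptrm -= 1
--     ntrmn = ntr + iptrm
--     total -= 1
--     ntr += total
--     return ntrmn, ntr
-- ===== SOURCE B (Python) =====
-- def gettransnos(trmno, total, iptrm):
--     # Closed form: the loop runs k = max(trmno-1, 0) times, adding an arithmetic series.
--     k = trmno - 1 if trmno > 1 else 0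
--     ntr0 = k * total - k * (k + 1) // 2
--     return ntr0 + iptrm - k - 1, ntr0 + total - k - 1
-- ===== Notes on version B (the rewrite author's own statement) =====
-- stated objective: faster
-- what changed: Replaces the O(trmno) decrement-and-accumulate loop with a closed-form arithmetic-series formula (Gauss sum), computing both outputs in O(1).
import Mathlib
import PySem

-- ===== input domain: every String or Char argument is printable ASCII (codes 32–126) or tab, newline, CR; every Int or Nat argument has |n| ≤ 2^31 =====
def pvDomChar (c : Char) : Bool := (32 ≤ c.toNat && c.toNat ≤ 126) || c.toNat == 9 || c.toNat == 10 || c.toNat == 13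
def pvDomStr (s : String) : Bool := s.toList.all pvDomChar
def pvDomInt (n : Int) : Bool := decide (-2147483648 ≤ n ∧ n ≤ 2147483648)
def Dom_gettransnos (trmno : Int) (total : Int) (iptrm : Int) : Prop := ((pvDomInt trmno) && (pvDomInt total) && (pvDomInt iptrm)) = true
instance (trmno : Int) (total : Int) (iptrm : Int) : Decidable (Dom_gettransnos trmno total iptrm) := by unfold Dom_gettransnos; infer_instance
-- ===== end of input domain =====

-- B replaces A's O(trmno) accumulation loop with a closed-form Gauss-sum formula (O(1)); proved equal on all Int inputs in Dom.


-- ===== PORT A =====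
-- loop state: (total, iptrm, ntr), updated once per element of range(trmno-1)
def gettransnos (trmno : Int) (total : Int) (iptrm : Int) : List Int :=
  let s := (PySem.List.pyRange 0 (trmno - 1) 1).foldl
    (fun (st : Int × Int × Int) _ => (st.1 - 1, st.2.1 - 1, st.2.2 + (st.1 - 1)))
    (total, iptrm, 0)
  let total := s.1
  let iptrm := s.2.1
  let ntr := s.2.2
  let iptrm := iptrm - 1
  let ntrmn := ntr + iptrm
  let total := total - 1
  let ntr := ntr + total
  [ntrmn, ntr]

-- ===== PORT B =====
def gettransnos_alt (trmno : Int) (total : Int) (iptrm : Int) : List Int :=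
  let k : Int := if trmno > 1 then trmno - 1 else 0
  let ntr0 := k * total - PySem.Int.floordiv (k * (k + 1)) 2
  [ntr0 + iptrm - k - 1, ntr0 + total - k - 1]

-- ===== PRECONDITION & SPEC =====
def Spec_gettransnos (trmno : Int) (total : Int) (iptrm : Int) (out : List Int) : Prop := out = gettransnos_alt trmno total iptrm
instance (trmno : Int) (total : Int) (iptrm : Int) (out : List Int) : Decidable (Spec_gettransnos trmno total iptrm out) := by unfold Spec_gettransnos; infer_instance

-- ===== CLAIM (what is proved, stated in full; the proofs are below) =====
def Claim_equal_gettransnos : Prop := ∀ (trmno : Int) (total : Int) (iptrm : Int), Dom_gettransnos trmno total iptrm → Spec_gettransnos trmno total iptrm (gettransnos trmno total iptrm)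

-- ===== LEMMAS AND PROOFS =====

-- The loop body ignores the range element, so the fold over any list of length m
-- produces (t - m, ip - m, ntr + m*t - T m) where T is the triangular number.
def pvTri : Nat → Nat
  | 0 => 0
  | n + 1 => pvTri n + (n + 1)

lemma pvTri_two_mul (n : Nat) : 2 * pvTri n = n * (n + 1) := by
  induction n with
  | zero => rfl
  | succ n ih => simp only [pvTri]; ring_nf; ring_nf at ih; omega

lemma pv_fold_loop (l : List Int) (t ip ntr : Int) :
    l.foldl (fun (st : Int × Int × Int) _ => (st.1 - 1, st.2.1 - 1, st.2.2 + (st.1 - 1))) (t, ip, ntr)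
      = (t - l.length, ip - l.length, ntr + (l.length : Int) * t - (pvTri l.length : Int)) := by
  induction l generalizing t ip ntr with
  | nil => simp
  | cons a l ih =>
    simp only [List.foldl_cons, ih, List.length_cons, pvTri]
    refine Prod.ext (by push_cast; ring) (Prod.ext (by push_cast; ring) ?_)
    push_cast
    ring

lemma pv_floordiv_tri (k : Nat) : PySem.Int.floordiv ((k : Int) * ((k : Int) + 1)) 2 = (pvTri k : Int) := by
  have h2 := pvTri_two_mul k
  have : ((k : Int) * ((k : Int) + 1)) = ((k * (k + 1) : Nat) : Int) := by push_cast; ring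
  rw [this]
  rw [show (2 : Int) = ((2 : Nat) : Int) from rfl, PySem.Int.floordiv_natCast]
  have hdiv : k * (k + 1) / 2 = pvTri k := by omega
  exact congrArg (fun n : Nat => (n : Int)) hdiv

-- ===== VERDICT (by name: the statement is the Claim_ definition above) =====
theorem gettransnos_spec : Claim_equal_gettransnos := by
  intro trmno total iptrm _
  unfold Spec_gettransnos gettransnos gettransnos_alt
  have hlen : (PySem.List.pyRange 0 (trmno - 1) 1).length = (trmno - 1).toNat := by
    simp
  rw [pv_fold_loop, hlen]
  by_cases h : trmno > 1
  · have hk : trmno - 1 = ((trmno - 1).toNat : Int) := by omega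
    simp only [if_pos h]
    rw [hk, pv_floordiv_tri]
    simp only [List.cons.injEq, and_true, Int.toNat_natCast]
    constructor <;> ring
  · have hk : (trmno - 1).toNat = 0 := by omega
    simp only [if_neg h, hk]
    norm_num [pvTri, PySem.Int.floordiv]
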